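-- pv_equiv track=rewrite | github.com/benkang-chen/Event-Extraction | ML/EventExtractionTemplateMatch/event_extraction.py | taking_organization
-- ===== SOURCE A (Python) =====
-- def taking_organization(nlp_result):
--     i = 0
--     state = False
--     organization = ""
--     result = []
--     while i < len(nlp_result):
--         if nlp_result[i][1] == 'ORGANIZATION':
--             organization += nlp_result[i][0]
--             if state == False:
--                 state = True
--         else:
--             if state == True:
--                 result.append(organization)
--                 organization = ""
--                 state = False
--         i += 1
--     if state == True:
--         result.append(organization)
--
--     result = list(set(result))
--
--     return result
-- ===== SOURCE B (Python) =====
-- def taking_organization(nlp_result):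
--     # run-splitting: repeatedly strip non-ORG tokens, then consume one whole run at a time
--     result = []
--     rest = nlp_result
--     while rest:
--         if rest[0][1] != 'ORGANIZATION':
--             rest = rest[1:]
--         else:
--             k = 1
--             while k < len(rest) and rest[k][1] == 'ORGANIZATION':
--                 k += 1
--             result.append(''.join(tok[0] for tok in rest[:k]))
--             rest = rest[k:]
--     return list(set(result))
-- ===== Notes on version B (the rewrite author's own statement) =====
-- stated objective: alternative
-- what changed: Replaces A's one-pass boolean state machine with a string accumulator by a run-splitting decomposition: repeatedly drop non-ORGANIZATION tokens, then take a whole maximal consecutive ORGANIZATION run at once and join its token strings, finishing with the same list(set(...)) dedup.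
import Mathlib
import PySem

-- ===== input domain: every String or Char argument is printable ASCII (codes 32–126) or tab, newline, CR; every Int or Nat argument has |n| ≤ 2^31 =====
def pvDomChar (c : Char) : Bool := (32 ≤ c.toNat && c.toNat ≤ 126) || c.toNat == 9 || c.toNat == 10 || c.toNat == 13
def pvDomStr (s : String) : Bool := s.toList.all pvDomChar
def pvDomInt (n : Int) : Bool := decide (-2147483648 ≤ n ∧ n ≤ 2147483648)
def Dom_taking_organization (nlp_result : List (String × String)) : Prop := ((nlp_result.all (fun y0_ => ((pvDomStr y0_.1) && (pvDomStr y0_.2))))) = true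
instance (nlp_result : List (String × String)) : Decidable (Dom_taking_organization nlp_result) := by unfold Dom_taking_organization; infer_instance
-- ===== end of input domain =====

-- B replaces A's one-pass boolean state machine by a run-splitting decomposition
-- (strip non-ORG tokens, consume one whole consecutive ORGANIZATION run at a time); objective: alternative.
-- Both programs end with list(set(result)) on the SAME accumulated run list, ported as PySem.Set.ofList.

-- ===== PORT A =====
-- loop body of A's while loop: state = (state, organization, result)
def aStep (acc : Bool × String × List String) (tok : String × String) : Bool × String × List String :=
  if tok.2 == "ORGANIZATION" then
    ((if acc.1 == false then true else acc.1), acc.2.1 ++ tok.1, acc.2.2)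
  else if acc.1 == true then (false, "", acc.2.2 ++ [acc.2.1])
  else acc

-- A's trailing 'if state == True: result.append(organization)'
def aFinish (acc : Bool × String × List String) : List String :=
  if acc.1 == true then acc.2.2 ++ [acc.2.1] else acc.2.2

def taking_organization (nlp_result : List (String × String)) : List String :=
  PySem.Set.ofList (aFinish (nlp_result.foldl aStep (false, "", [])))

-- ===== PORT B =====
-- ''.join(strs): with the empty separator this is exactly left-fold concatenation
def bJoin (strs : List String) : String := strs.foldl (fun s t => s ++ t) ""

-- B's outer while loop: drop a non-ORG head, or consume a maximal consecutive ORG run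
def bLoop : List (String × String) → List String
  | [] => []
  | x :: rest =>
    if x.2 == "ORGANIZATION" then
      bJoin ((x :: rest.takeWhile (fun t => t.2 == "ORGANIZATION")).map (·.1))
        :: bLoop (rest.dropWhile (fun t => t.2 == "ORGANIZATION"))
    else bLoop rest
termination_by l => l.length
decreasing_by
  · exact Nat.lt_succ_of_le (List.length_dropWhile_le _ _)
  · exact Nat.lt_succ_self _

def taking_organization_alt (nlp_result : List (String × String)) : List String :=
  PySem.Set.ofList (bLoop nlp_result)

-- ===== PRECONDITION & SPEC =====
def Spec_taking_organization (nlp_result : List (String × String)) (out : List String) : Prop := out = taking_organization_alt nlp_result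
instance (nlp_result : List (String × String)) (out : List String) : Decidable (Spec_taking_organization nlp_result out) := by unfold Spec_taking_organization; infer_instance

-- ===== CLAIM (what is proved, stated in full; the proofs are below) =====
def Claim_equal_taking_organization : Prop := ∀ (nlp_result : List (String × String)), Dom_taking_organization nlp_result → Spec_taking_organization nlp_result (taking_organization nlp_result)

-- ===== LEMMAS AND PROOFS =====

-- string accumulated by A while continuing a run that already holds 'org'
def contRun (org : String) (l : List (String × String)) : String :=
  (l.takeWhile (fun t => t.2 == "ORGANIZATION")).foldl (fun s t => s ++ t.1) org

-- the two loop invariants, proved together by one induction on the token list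
theorem loop_inv (l : List (String × String)) :
    (∀ res, aFinish (l.foldl aStep (false, "", res)) = res ++ bLoop l) ∧
    (∀ org res, aFinish (l.foldl aStep (true, org, res)) =
      res ++ (contRun org l :: bLoop (l.dropWhile (fun t => t.2 == "ORGANIZATION")))) := by
  induction l with
  | nil => exact ⟨fun res => by simp [aFinish, bLoop], fun org res => by simp [aFinish, contRun, bLoop]⟩
  | cons x l ih =>
    constructor
    · intro res
      by_cases hx : x.2 == "ORGANIZATION"
      · rw [List.foldl_cons,
          show aStep (false, "", res) x = (true, "" ++ x.1, res) by simp [aStep, hx]]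
        rw [ih.2 ("" ++ x.1) res, bLoop]
        simp [hx, contRun, bJoin, List.foldl_map]
      · rw [List.foldl_cons,
          show aStep (false, "", res) x = (false, "", res) by simp [aStep, hx]]
        rw [ih.1 res, bLoop]
        simp [hx]
    · intro org res
      by_cases hx : x.2 == "ORGANIZATION"
      · rw [List.foldl_cons,
          show aStep (true, org, res) x = (true, org ++ x.1, res) by simp [aStep, hx]]
        rw [ih.2 (org ++ x.1) res]
        simp [contRun, hx]
      · rw [List.foldl_cons,
          show aStep (true, org, res) x = (false, "", res ++ [org]) by simp [aStep, hx]]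
        rw [ih.1 (res ++ [org])]
        simp [contRun, hx, bLoop]

-- ===== VERDICT (by name: the statement is the Claim_ definition above) =====
theorem taking_organization_spec : Claim_equal_taking_organization := by
  intro l _
  show taking_organization l = taking_organization_alt l
  unfold taking_organization taking_organization_alt
  rw [(loop_inv l).1 []]
  simp
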